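-- pv_equiv track=rewrite | github.com/pypi-data/pypi-mirror-390 | packages/sleepscienceviewer/sleepscienceviewer-0.5.1-py3-none-any.whl/sleepscienceviewer/AnnotationXmlClass.py | reorder_labels_stages
-- ===== SOURCE A (Python) =====
-- def reorder_labels_stages(y_labels:dict[int,str], stages:list[int]):
--     """
--         Reorders sleep stage labels and stages for hypnogram plotting.
--         Desired order: Wake, REM, then NREM stages (N1, N2, N3, N4, or NREM)
--
--         Works with various labeling schemes:
--         - Individual NREM stages: N1, N2, N3, N4
--         - Reduced NREM stages: N1, N2, N3 (no N4)
--         - Consolidated NREM: just "NREM"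
--         - 3-stage system: W, NREM, REM
--         - Alternative formats: Stage 1, S1, etc.
--
--         Args:
--             y_labels: Dictionary mapping original stage numbers to stage labels
--             stages: List of stage numbers from sleep data
--
--         Returns:
--             plot_labels_plot: Dictionary mapping new stage numbers to stage labels
--             plot_stages: List of remapped stage numbers for plotting
--         """
--     plot_labels_plot = {}
--     #plot_stages = []
--
--     # Create mapping from original stage number to new plot position
--     original_to_plot = {}
--     plot_position = 0
--
--     # Step 1: Find and map Wake stages first
--     wake_patterns = ['W', 'WAKE', 'AWAKE']
--     for original_stage_num, label in y_labels.items():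
--         if any(pattern in label.upper() for pattern in wake_patterns):
--             original_to_plot[original_stage_num] = plot_position
--             plot_labels_plot[plot_position] = label
--             plot_position += 1
--
--     # Step 2: Find and map REM stages second
--     # rem_patterns = ['REM', 'R']
--     for original_stage_num, label in y_labels.items():
--         if (label.upper().strip() == "REM" and
--                 original_stage_num not in original_to_plot):
--             original_to_plot[original_stage_num] = plot_position
--             plot_labels_plot[plot_position] = label
--             plot_position += 1
--
--     # Step 3: Find and map NREM stages in order (N1, N2, N3, N4, or NREM)
--     # First try specific NREM stages in numerical order
--     nrem_patterns = ['N1', 'N2', 'N3', 'N4', 'STAGE 1', 'STAGE 2', 'STAGE 3', 'STAGE 4', 'S1', 'S2', 'S3', 'S4']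
--     for nrem_pattern in nrem_patterns:
--         for original_stage_num, label in y_labels.items():
--             if (label.upper().strip() == nrem_pattern and
--                     original_stage_num not in original_to_plot):
--                 original_to_plot[original_stage_num] = plot_position
--                 plot_labels_plot[plot_position] = label
--                 plot_position += 1
--                 break  # Only add the first match for each pattern
--
--     # Step 4: Handle general NREM label (if present and no specific N1-N4 found)
--     # Check if we have any specific NREM stages in the original labels
--     has_specific_nrem = any('N' in label.upper() and any(char.isdigit() for char in label)
--                             for label in y_labels.values())
--
--     if not has_specific_nrem:  # Only add general NREM if no specific stages exist
--         for original_stage_num, label in y_labels.items():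
--             if ('NREM' in label.upper() and
--                     original_stage_num not in original_to_plot):
--                 original_to_plot[original_stage_num] = plot_position
--                 plot_labels_plot[plot_position] = label
--                 plot_position += 1
--
--     # Step 5: Add any remaining stages that weren't categorized
--     for original_stage_num, label in y_labels.items():
--         if original_stage_num not in original_to_plot:
--             original_to_plot[original_stage_num] = plot_position
--             plot_labels_plot[plot_position] = label
--             plot_position += 1
--
--     # Remap the stages array using the new mapping
--     plot_stages = [original_to_plot[stage] for stage in stages]
--
--     return plot_labels_plot, plot_stages
-- ===== SOURCE B (Python) =====
-- def reorder_labels_stages(y_labels: dict[int, str], stages: list[int]):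
--     """Single classification pass into ordered buckets, then one concatenation."""
--     wake_patterns = ['W', 'WAKE', 'AWAKE']
--     nrem_patterns = ['N1', 'N2', 'N3', 'N4', 'STAGE 1', 'STAGE 2', 'STAGE 3', 'STAGE 4',
--                      'S1', 'S2', 'S3', 'S4']
--     has_specific_nrem = any('N' in label.upper() and any(char.isdigit() for char in label)
--                             for label in y_labels.values())
--     wake, rem, general, rest = [], [], [], []
--     slots = [None] * len(nrem_patterns)   # first label matching each NREM pattern
--     for k, label in y_labels.items():
--         u = label.upper()
--         s = u.strip()
--         idx = nrem_patterns.index(s) if s in nrem_patterns else -1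
--         if any(p in u for p in wake_patterns):
--             wake.append((k, label))
--         elif s == 'REM':
--             rem.append((k, label))
--         elif idx >= 0 and slots[idx] is None:
--             slots[idx] = (k, label)
--         elif not has_specific_nrem and 'NREM' in u:
--             general.append((k, label))
--         else:
--             rest.append((k, label))
--     ordered = wake + rem + [x for x in slots if x is not None] + general + rest
--     plot_labels_plot = {i: label for i, (k, label) in enumerate(ordered)}
--     pos = {k: i for i, (k, label) in enumerate(ordered)}
--     plot_stages = [pos[s] for s in stages]
--     return plot_labels_plot, plot_stages
-- ===== Notes on version B (the rewrite author's own statement) =====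
-- stated objective: alternative
-- what changed: Replaces A's five full passes over the dict (including a nested 12-pattern scan) by a single classification pass that drops each item into one of five ordered buckets (wake, REM, per-pattern first-match slots, general NREM, rest) followed by one concatenation and enumeration.
-- outside the precondition, e.g. on reorder_labels_stages({}, [0]): A raises KeyError, B raises KeyError
import Mathlib
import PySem

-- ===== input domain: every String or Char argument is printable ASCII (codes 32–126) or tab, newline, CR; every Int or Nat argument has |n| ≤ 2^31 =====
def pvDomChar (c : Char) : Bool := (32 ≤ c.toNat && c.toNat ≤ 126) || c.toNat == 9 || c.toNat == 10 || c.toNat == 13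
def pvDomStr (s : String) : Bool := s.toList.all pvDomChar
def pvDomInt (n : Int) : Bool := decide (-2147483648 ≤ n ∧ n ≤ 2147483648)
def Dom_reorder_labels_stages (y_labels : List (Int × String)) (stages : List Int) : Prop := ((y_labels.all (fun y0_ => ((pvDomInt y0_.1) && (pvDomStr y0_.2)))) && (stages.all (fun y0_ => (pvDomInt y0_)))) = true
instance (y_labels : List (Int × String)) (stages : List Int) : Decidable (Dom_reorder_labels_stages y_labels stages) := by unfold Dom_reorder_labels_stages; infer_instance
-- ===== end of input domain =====

-- B replaces A's five passes over the dict by a single classification pass into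
-- ordered buckets plus one concatenation; equivalence is about the return value only.

-- ===== PORT A =====
-- shared constants and the label tests both Python versions spell out inline
def pvWakePatterns : List String := ["W", "WAKE", "AWAKE"]
def pvNremPatterns : List String :=
  ["N1", "N2", "N3", "N4", "STAGE 1", "STAGE 2", "STAGE 3", "STAGE 4", "S1", "S2", "S3", "S4"]
-- any(pattern in label.upper() for pattern in wake_patterns)
def pvIsWake (label : String) : Bool :=
  pvWakePatterns.any (fun p => PySem.Str.isIn p (PySem.Str.upper label))
-- label.upper().strip()
def pvStrip (label : String) : String := PySem.Str.strip (PySem.Str.upper label)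
-- 'NREM' in label.upper()
def pvIsNremSub (label : String) : Bool := PySem.Str.isIn "NREM" (PySem.Str.upper label)
-- 'N' in label.upper() and any(char.isdigit() for char in label)
def pvIsSpecific (label : String) : Bool :=
  PySem.Str.isIn "N" (PySem.Str.upper label) && label.toList.any (fun c => PySem.Chars.isdigit c)

-- A's mutable state: (original_to_plot, plot_labels_plot, plot_position)
def pvPush (st : PySem.Dict Int Int × PySem.Dict Int String × Int) (kv : Int × String) :
    PySem.Dict Int Int × PySem.Dict Int String × Int :=
  (st.1.insert kv.1 st.2.2, st.2.1.insert st.2.2 kv.2, st.2.2 + 1)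

-- Step 3 inner loop: 'for …: if …: …; break'
def pvFindPattern (p : String) (l : List (Int × String))
    (st : PySem.Dict Int Int × PySem.Dict Int String × Int) :
    PySem.Dict Int Int × PySem.Dict Int String × Int :=
  match l with
  | [] => st
  | kv :: rest =>
      if pvStrip kv.2 == p && !(st.1.contains kv.1) then pvPush st kv
      else pvFindPattern p rest st

def reorder_labels_stages (y_labels : List (Int × String)) (stages : List Int) :
    (List (Int × String)) × List Int :=
  let st0 : PySem.Dict Int Int × PySem.Dict Int String × Int :=
    (PySem.Dict.empty, PySem.Dict.empty, 0)
  -- Step 1: wake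
  let st1 := y_labels.foldl (fun st kv => if pvIsWake kv.2 then pvPush st kv else st) st0
  -- Step 2: REM
  let st2 := y_labels.foldl
    (fun st kv => if pvStrip kv.2 == "REM" && !(st.1.contains kv.1) then pvPush st kv else st) st1
  -- Step 3: first match for each specific NREM pattern
  let st3 := pvNremPatterns.foldl (fun st p => pvFindPattern p y_labels st) st2
  -- Step 4: general NREM, only if no specific NREM label exists
  let has_specific_nrem := y_labels.any (fun kv => pvIsSpecific kv.2)
  let st4 :=
    if !has_specific_nrem then
      y_labels.foldl
        (fun st kv => if pvIsNremSub kv.2 && !(st.1.contains kv.1) then pvPush st kv else st) st3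
    else st3
  -- Step 5: whatever is left
  let st5 := y_labels.foldl (fun st kv => if !(st.1.contains kv.1) then pvPush st kv else st) st4
  -- original_to_plot[stage] raises KeyError on a missing key: excluded by Pre_; .getD 0 is never used inside Pre_
  (st5.2.1.items, stages.map (fun s => (st5.1.get? s).getD 0))

-- ===== PORT B =====
-- one classification step of B's single pass; state = (wake, rem, slots, general, rest)
def pvBStep (has_specific_nrem : Bool)
    (st : List (Int × String) × List (Int × String) × List (Option (Int × String)) ×
          List (Int × String) × List (Int × String)) (kv : Int × String) :
    List (Int × String) × List (Int × String) × List (Option (Int × String)) ×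
      List (Int × String) × List (Int × String) :=
  match st with
  | (w, r, sl, g, rs) =>
    let other := if !has_specific_nrem && pvIsNremSub kv.2 then (w, r, sl, g ++ [kv], rs)
                 else (w, r, sl, g, rs ++ [kv])
    if pvIsWake kv.2 then (w ++ [kv], r, sl, g, rs)
    else if pvStrip kv.2 == "REM" then (w, r ++ [kv], sl, g, rs)
    else
      match PySem.List.index? pvNremPatterns (pvStrip kv.2) with
      | some i => if (sl[i]?.getD none) = none then (w, r, sl.set i (some kv), g, rs) else other
      | none => other

def reorder_labels_stages_alt (y_labels : List (Int × String)) (stages : List Int) :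
    (List (Int × String)) × List Int :=
  let has_specific_nrem := y_labels.any (fun kv => pvIsSpecific kv.2)
  let fin := y_labels.foldl (pvBStep has_specific_nrem)
    ([], [], List.replicate pvNremPatterns.length none, [], [])
  let ordered := fin.1 ++ fin.2.1 ++ fin.2.2.1.filterMap id ++ fin.2.2.2.1 ++ fin.2.2.2.2
  -- {i: label for i, (k, label) in enumerate(ordered)} — keys are distinct, so the dict's items are this list
  let plot_labels := ordered.zipIdx.map (fun p => ((p.2 : Int), p.1.2))
  -- pos = {k: i for i, (k, label) in enumerate(ordered)}
  let pos := ordered.zipIdx.foldl (fun d p => d.insert p.1.1 ((p.2 : Int))) PySem.Dict.empty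
  -- pos[s] raises KeyError on a missing key: excluded by Pre_
  (plot_labels, stages.map (fun s => (pos.get? s).getD 0))

-- ===== PRECONDITION & SPEC =====
-- Pre_ excludes (a) stages containing a number that is not a key of y_labels — both A and B
-- raise KeyError there — and (b) association lists with duplicate keys, which do not encode a
-- Python dict (both Pythons receive the deduplicated dict and agree there).
def Pre_reorder_labels_stages (y_labels : List (Int × String)) (stages : List Int) : Prop :=
  (y_labels.map Prod.fst).Nodup ∧ ∀ s ∈ stages, s ∈ y_labels.map Prod.fst
instance (y_labels : List (Int × String)) (stages : List Int) :
    Decidable (Pre_reorder_labels_stages y_labels stages) := by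
  unfold Pre_reorder_labels_stages; infer_instance

def pvWitness_reorder_labels_stages : (List (Int × String)) × List Int :=
  ([(0, "Wake"), (1, "REM"), (2, "N1"), (3, "N2")], [0, 1, 2, 3, 0])

def Spec_reorder_labels_stages (y_labels : List (Int × String)) (stages : List Int)
    (out : (List (Int × String)) × List Int) : Prop :=
  out = reorder_labels_stages_alt y_labels stages
instance (y_labels : List (Int × String)) (stages : List Int)
    (out : (List (Int × String)) × List Int) :
    Decidable (Spec_reorder_labels_stages y_labels stages out) := by
  unfold Spec_reorder_labels_stages; infer_instance

-- ===== CLAIM (what is proved, stated in full; the proofs are below) =====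
def Claim_equal_reorder_labels_stages : Prop := ∀ (y_labels : List (Int × String)) (stages : List Int), Dom_reorder_labels_stages y_labels stages → Pre_reorder_labels_stages y_labels stages → Spec_reorder_labels_stages y_labels stages (reorder_labels_stages y_labels stages)

-- ===== LEMMAS AND PROOFS =====

-- the classification predicates both programs decide, as pure functions of one item
def pvSlotPred (p : String) (kv : Int × String) : Bool :=
  !pvIsWake kv.2 && !(pvStrip kv.2 == "REM") && (pvStrip kv.2 == p)
def pvPicked (y : List (Int × String)) (kv : Int × String) : Bool :=
  pvNremPatterns.any (fun p => y.find? (pvSlotPred p) == some kv)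
def pvGenPred (y : List (Int × String)) (hs : Bool) (kv : Int × String) : Bool :=
  !pvIsWake kv.2 && !(pvStrip kv.2 == "REM") && !pvPicked y kv && (!hs && pvIsNremSub kv.2)
def pvRestPred (y : List (Int × String)) (hs : Bool) (kv : Int × String) : Bool :=
  !pvIsWake kv.2 && !(pvStrip kv.2 == "REM") && !pvPicked y kv && !(!hs && pvIsNremSub kv.2)

def pvSlotItem (y : List (Int × String)) (p : String) : List (Int × String) :=
  (y.find? (pvSlotPred p)).toList

-- the ordering both programs realise
def pvOrdered (y : List (Int × String)) : List (Int × String) :=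
  y.filter (fun kv => pvIsWake kv.2) ++
  y.filter (fun kv => !pvIsWake kv.2 && (pvStrip kv.2 == "REM")) ++
  pvNremPatterns.flatMap (pvSlotItem y) ++
  y.filter (pvGenPred y (y.any (fun kv => pvIsSpecific kv.2))) ++
  y.filter (pvRestPred y (y.any (fun kv => pvIsSpecific kv.2)))

-- A's two dicts, as a function of the list of already-placed items
def pvKeyDict (os : List (Int × String)) : PySem.Dict Int Int :=
  os.zipIdx.foldl (fun d p => d.insert p.1.1 ((p.2 : Int))) PySem.Dict.empty
def pvLabDict (os : List (Int × String)) : PySem.Dict Int String :=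
  os.zipIdx.foldl (fun d p => d.insert ((p.2 : Int)) p.1.2) PySem.Dict.empty
def pvMkSt (os : List (Int × String)) : PySem.Dict Int Int × PySem.Dict Int String × Int :=
  (pvKeyDict os, pvLabDict os, (os.length : Int))

theorem pvKeyDict_append (os : List (Int × String)) (kv : Int × String) :
    pvKeyDict (os ++ [kv]) = (pvKeyDict os).insert kv.1 (os.length : Int) := by
  unfold pvKeyDict
  rw [List.zipIdx_append, List.foldl_append]
  simp

theorem pvLabDict_append (os : List (Int × String)) (kv : Int × String) :
    pvLabDict (os ++ [kv]) = (pvLabDict os).insert (os.length : Int) kv.2 := by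
  unfold pvLabDict
  rw [List.zipIdx_append, List.foldl_append]
  simp

theorem pvPush_mkSt (os : List (Int × String)) (kv : Int × String) :
    pvPush (pvMkSt os) kv = pvMkSt (os ++ [kv]) := by
  unfold pvPush pvMkSt
  rw [pvKeyDict_append, pvLabDict_append]
  simp

theorem pvZipIdx_keys (os : List (Int × String)) :
    os.zipIdx.map (fun p => p.1.1) = os.map Prod.fst := by
  rw [show (fun (p : (Int × String) × Nat) => p.1.1) = Prod.fst ∘ Prod.fst from rfl,
    ← List.map_map, List.zipIdx_map_fst]

theorem pvKeyDict_contains (os : List (Int × String)) (k : Int) :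
    (pvKeyDict os).contains k = decide (k ∈ os.map Prod.fst) := by
  unfold pvKeyDict
  rw [PySem.Dict.contains_eq_decide_mem_keys]
  have hk := PySem.Dict.keys_foldl_insert_key (l := os.zipIdx) (key := fun p => p.1.1)
    (f := fun _ p => ((p.2 : Int))) (d := PySem.Dict.empty)
  rw [hk]
  have h2 : PySem.Set.update (PySem.Dict.empty : PySem.Dict Int Int).keys
      (os.zipIdx.map (fun p => p.1.1)) = PySem.Set.ofList (os.map Prod.fst) := by
    rw [pvZipIdx_keys, PySem.Set.ofList_eq_foldl]; rfl
  rw [h2]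
  simp [PySem.Set.mem_ofList]

theorem pvLabDict_items (os : List (Int × String)) :
    (pvLabDict os).items = os.zipIdx.map (fun p => ((p.2 : Int), p.1.2)) := by
  unfold pvLabDict
  have hnd : (os.zipIdx.map (fun p => ((p.2 : Int)))).Nodup := by
    have h1 : os.zipIdx.map (fun p => ((p.2 : Int))) =
        (os.zipIdx.map Prod.snd).map Int.ofNat := by
      rw [List.map_map]; rfl
    rw [h1, List.zipIdx_map_snd]
    exact ((List.nodup_range' 1).map (fun a b h => Int.ofNat.inj h))
  have h := PySem.Dict.items_foldl_insert_fresh os.zipIdx (fun p => ((p.2 : Int)))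
    (fun p => p.1.2) PySem.Dict.empty (fun a _ => rfl) hnd
  rw [h]; rfl

-- find? only looks at members
theorem pvFind?_congr {α : Type} (l : List α) (p q : α → Bool) (h : ∀ x ∈ l, p x = q x) :
    l.find? p = l.find? q := by
  induction l with
  | nil => rfl
  | cons x t ih =>
    have hx := h x (by simp)
    by_cases hp : p x = true
    · rw [List.find?_cons_of_pos hp, List.find?_cons_of_pos (hx ▸ hp)]
    · rw [List.find?_cons_of_neg (by simpa using hp),
        List.find?_cons_of_neg (by rw [← hx]; simpa using hp)]
      exact ih (fun x hx => h x (by simp [hx]))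

-- keys of a filtered sublist, under unique keys
theorem pvMem_filter_keys (y : List (Int × String)) (hnd : (y.map Prod.fst).Nodup)
    (q : Int × String → Bool) (kv : Int × String) (hkv : kv ∈ y) :
    kv.1 ∈ (y.filter q).map Prod.fst ↔ q kv = true := by
  constructor
  · intro h
    obtain ⟨kv', hkv', hfst⟩ := List.mem_map.1 h
    obtain ⟨hm, hq⟩ := List.mem_filter.1 hkv'
    have := List.inj_on_of_nodup_map hnd hm hkv hfst
    rwa [this] at hq
  · intro h
    exact List.mem_map_of_mem (List.mem_filter.2 ⟨hkv, h⟩)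

theorem pvMem_slot_keys (y : List (Int × String)) (hnd : (y.map Prod.fst).Nodup)
    (done : List String) (kv : Int × String) (hkv : kv ∈ y) :
    kv.1 ∈ (done.flatMap (pvSlotItem y)).map Prod.fst ↔
      ∃ p ∈ done, y.find? (pvSlotPred p) = some kv := by
  constructor
  · intro h
    obtain ⟨kv', hkv', hfst⟩ := List.mem_map.1 h
    obtain ⟨p, hp, hmem⟩ := List.mem_flatMap.1 hkv'
    have hfind : y.find? (pvSlotPred p) = some kv' := by
      unfold pvSlotItem at hmem
      cases hf : y.find? (pvSlotPred p) with
      | none => rw [hf] at hmem; simp at hmem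
      | some x => rw [hf] at hmem; simp at hmem; simp [hmem]
    have hy' : kv' ∈ y := List.mem_of_find?_eq_some hfind
    have := List.inj_on_of_nodup_map hnd hy' hkv hfst
    exact ⟨p, hp, this ▸ hfind⟩
  · rintro ⟨p, hp, hfind⟩
    apply List.mem_map_of_mem
    apply List.mem_flatMap.2
    exact ⟨p, hp, by simp [pvSlotItem, hfind]⟩

-- == generic pass lemmas for A's loops ==

theorem pvPassPlain (g : Int × String → Bool) :
    ∀ (l : List (Int × String)) (os : List (Int × String)),
    l.foldl (fun st kv => if g kv then pvPush st kv else st) (pvMkSt os)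
      = pvMkSt (os ++ l.filter g) := by
  intro l
  induction l with
  | nil => intro os; simp
  | cons kv t ih =>
    intro os
    rw [List.foldl_cons]
    by_cases h : g kv = true
    · rw [if_pos h, pvPush_mkSt, ih (os ++ [kv])]
      simp [h]
    · rw [if_neg h, ih os]
      simp [h]

theorem pvPassMem (q : Int × String → Bool) :
    ∀ (l : List (Int × String)) (os : List (Int × String)),
    (l.map Prod.fst).Nodup →
    l.foldl (fun st kv => if q kv && !(st.1.contains kv.1) then pvPush st kv else st) (pvMkSt os)
      = pvMkSt (os ++ l.filter (fun kv => q kv && !(decide (kv.1 ∈ os.map Prod.fst)))) := by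
  intro l
  induction l with
  | nil => intro os _; simp
  | cons kv t ih =>
    intro os hnd
    have hnd' : (t.map Prod.fst).Nodup := (List.nodup_cons.1 (by simpa using hnd)).2
    have hkv : kv.1 ∉ t.map Prod.fst := (List.nodup_cons.1 (by simpa using hnd)).1
    rw [List.foldl_cons]
    have hc : (pvMkSt os).1.contains kv.1 = decide (kv.1 ∈ os.map Prod.fst) :=
      pvKeyDict_contains os kv.1
    rw [hc]
    by_cases h : (q kv && !(decide (kv.1 ∈ os.map Prod.fst))) = true
    · rw [if_pos h, pvPush_mkSt, ih (os ++ [kv]) hnd']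
      have hfil : t.filter (fun kv' => q kv' && !(decide (kv'.1 ∈ (os ++ [kv]).map Prod.fst)))
          = t.filter (fun kv' => q kv' && !(decide (kv'.1 ∈ os.map Prod.fst))) := by
        apply List.filter_congr
        intro x hx
        have hne : x.1 ≠ kv.1 := by
          intro he; exact hkv (he ▸ List.mem_map_of_mem hx)
        have hd : decide (x.1 ∈ (os ++ [kv]).map Prod.fst)
            = decide (x.1 ∈ os.map Prod.fst) := by
          simp [hne]
        rw [hd]
      rw [hfil]
      simp [h]
    · rw [if_neg h, ih os hnd']
      simp only [List.filter_cons]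
      rw [if_neg h]

theorem pvFindPattern_eq (p : String) :
    ∀ (l : List (Int × String)) (os : List (Int × String)),
    pvFindPattern p l (pvMkSt os) =
      match l.find? (fun kv => (pvStrip kv.2 == p) && !(decide (kv.1 ∈ os.map Prod.fst))) with
      | some kv => pvMkSt (os ++ [kv])
      | none => pvMkSt os := by
  intro l
  induction l with
  | nil => intro os; simp [pvFindPattern]
  | cons kv t ih =>
    intro os
    rw [show pvFindPattern p (kv :: t) (pvMkSt os)
        = (if (pvStrip kv.2 == p && !((pvMkSt os).1.contains kv.1)) = true
           then pvPush (pvMkSt os) kv else pvFindPattern p t (pvMkSt os)) from rfl]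
    have hc : (pvMkSt os).1.contains kv.1 = decide (kv.1 ∈ os.map Prod.fst) :=
      pvKeyDict_contains os kv.1
    rw [hc, List.find?_cons]
    by_cases h : ((pvStrip kv.2 == p) && !(decide (kv.1 ∈ os.map Prod.fst))) = true
    · rw [if_pos h, h]
      exact pvPush_mkSt os kv
    · rw [if_neg h, Bool.eq_false_iff.2 h]
      exact ih os

theorem pvFindPattern_some (p : String) (kv : Int × String) (l os : List (Int × String))
    (h : l.find? (fun kv => (pvStrip kv.2 == p) && !(decide (kv.1 ∈ os.map Prod.fst)))
      = some kv) :
    pvFindPattern p l (pvMkSt os) = pvMkSt (os ++ [kv]) := by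
  rw [pvFindPattern_eq, h]

theorem pvFindPattern_none (p : String) (l os : List (Int × String))
    (h : l.find? (fun kv => (pvStrip kv.2 == p) && !(decide (kv.1 ∈ os.map Prod.fst)))
      = none) :
    pvFindPattern p l (pvMkSt os) = pvMkSt os := by
  rw [pvFindPattern_eq, h]

-- == characterising the keys present after each of A's steps ==

def pvOs2 (y : List (Int × String)) : List (Int × String) :=
  y.filter (fun kv => pvIsWake kv.2) ++
  y.filter (fun kv => !pvIsWake kv.2 && (pvStrip kv.2 == "REM"))

theorem pvMem_os2_keys (y : List (Int × String)) (hnd : (y.map Prod.fst).Nodup)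
    (kv : Int × String) (hkv : kv ∈ y) :
    kv.1 ∈ (pvOs2 y).map Prod.fst ↔ (pvIsWake kv.2 || (pvStrip kv.2 == "REM")) = true := by
  unfold pvOs2
  rw [List.map_append, List.mem_append, pvMem_filter_keys y hnd _ kv hkv,
    pvMem_filter_keys y hnd _ kv hkv]
  cases hw : pvIsWake kv.2 <;> cases hr : (pvStrip kv.2 == "REM") <;> simp

theorem pvNrem_nodup : pvNremPatterns.Nodup := by decide

theorem pvStep3 (y : List (Int × String)) (hnd : (y.map Prod.fst).Nodup) :
    ∀ (ps done : List String), done ++ ps = pvNremPatterns →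
    ps.foldl (fun st p => pvFindPattern p y st)
        (pvMkSt (pvOs2 y ++ done.flatMap (pvSlotItem y)))
      = pvMkSt (pvOs2 y ++ pvNremPatterns.flatMap (pvSlotItem y)) := by
  intro ps
  induction ps with
  | nil => intro done hdone; rw [List.foldl_nil, ← hdone, List.append_nil]
  | cons p ps' ih =>
    intro done hdone
    rw [List.foldl_cons]
    have hp_not_done : p ∉ done := by
      have := pvNrem_nodup
      rw [← hdone] at this
      have h2 := (List.nodup_append.1 this).2.2
      intro hmem
      exact h2 p hmem p (by simp) rfl
    have hfind : y.find? (fun kv => (pvStrip kv.2 == p) &&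
        !(decide (kv.1 ∈ (pvOs2 y ++ done.flatMap (pvSlotItem y)).map Prod.fst)))
        = y.find? (pvSlotPred p) := by
      apply pvFind?_congr
      intro kv hkv
      by_cases hsp : (pvStrip kv.2 == p) = true
      · have hmem : kv.1 ∈ (pvOs2 y ++ done.flatMap (pvSlotItem y)).map Prod.fst ↔
            (pvIsWake kv.2 || (pvStrip kv.2 == "REM")) = true := by
          rw [List.map_append, List.mem_append, pvMem_os2_keys y hnd kv hkv,
            pvMem_slot_keys y hnd done kv hkv]
          constructor
          · rintro (h | ⟨q, hq, hf⟩)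
            · exact h
            · exfalso
              have hsq := List.find?_some hf
              simp only [pvSlotPred, Bool.and_eq_true, beq_iff_eq] at hsq
              have h1 : pvStrip kv.2 = q := hsq.2
              have h2 : pvStrip kv.2 = p := by simpa using hsp
              exact hp_not_done ((h1.symm.trans h2) ▸ hq)
          · intro h; exact Or.inl h
        unfold pvSlotPred
        rw [hsp]
        by_cases hm : kv.1 ∈ (pvOs2 y ++ done.flatMap (pvSlotItem y)).map Prod.fst
        · have := hmem.1 hm
          simp only [decide_eq_true hm]
          cases hw : pvIsWake kv.2 <;> cases hr : (pvStrip kv.2 == "REM") <;>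
            rw [hw, hr] at this <;> simp_all
        · have : ¬ ((pvIsWake kv.2 || (pvStrip kv.2 == "REM")) = true) := fun h => hm (hmem.2 h)
          simp only [decide_eq_false hm]
          cases hw : pvIsWake kv.2 <;> cases hr : (pvStrip kv.2 == "REM") <;>
            rw [hw, hr] at this <;> simp_all
      · unfold pvSlotPred
        have hf : (pvStrip kv.2 == p) = false := Bool.eq_false_iff.2 hsp
        simp [hf]
    cases hf : y.find? (pvSlotPred p) with
    | some kv =>
      rw [pvFindPattern_some p kv y _ (hfind.trans hf)]
      have hstep : pvOs2 y ++ done.flatMap (pvSlotItem y) ++ [kv]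
          = pvOs2 y ++ (done ++ [p]).flatMap (pvSlotItem y) := by
        rw [List.flatMap_append, List.append_assoc]
        simp [pvSlotItem, hf]
      rw [hstep]
      exact ih (done ++ [p]) (by rw [List.append_assoc]; simpa using hdone)
    | none =>
      rw [pvFindPattern_none p y _ (hfind.trans hf)]
      have hstep : pvOs2 y ++ done.flatMap (pvSlotItem y)
          = pvOs2 y ++ (done ++ [p]).flatMap (pvSlotItem y) := by
        rw [List.flatMap_append]
        simp [pvSlotItem, hf]
      rw [hstep]
      exact ih (done ++ [p]) (by rw [List.append_assoc]; simpa using hdone)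

-- == assembling A's five passes ==

theorem pvDecide_eq {P : Prop} [Decidable P] {b : Bool} (h : P ↔ b = true) : decide P = b := by
  simp [h]

theorem pvPassAll (l os : List (Int × String)) (hnd : (l.map Prod.fst).Nodup) :
    l.foldl (fun st kv => if !(st.1.contains kv.1) then pvPush st kv else st) (pvMkSt os)
      = pvMkSt (os ++ l.filter (fun kv => !(decide (kv.1 ∈ os.map Prod.fst)))) :=
  pvPassMem (fun _ => true) l os hnd

theorem pvPicked_iff (y : List (Int × String)) (kv : Int × String) :
    pvPicked y kv = true ↔ ∃ p ∈ pvNremPatterns, y.find? (pvSlotPred p) = some kv := by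
  unfold pvPicked
  rw [List.any_eq_true]
  constructor
  · rintro ⟨p, hp, h⟩; exact ⟨p, hp, by simpa using h⟩
  · rintro ⟨p, hp, h⟩; exact ⟨p, hp, by simpa using h⟩

theorem pvMem_os3_keys (y : List (Int × String)) (hnd : (y.map Prod.fst).Nodup)
    (kv : Int × String) (hkv : kv ∈ y) :
    kv.1 ∈ ((pvOs2 y ++ pvNremPatterns.flatMap (pvSlotItem y)).map Prod.fst) ↔
      (pvIsWake kv.2 || (pvStrip kv.2 == "REM") || pvPicked y kv) = true := by
  rw [List.map_append, List.mem_append, pvMem_os2_keys y hnd kv hkv,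
    pvMem_slot_keys y hnd _ kv hkv, ← pvPicked_iff y kv]
  cases pvIsWake kv.2 <;> cases (pvStrip kv.2 == "REM") <;> cases pvPicked y kv <;> simp

theorem pvA_state (y : List (Int × String)) (hnd : (y.map Prod.fst).Nodup) :
    (y.foldl (fun st kv => if !(st.1.contains kv.1) then pvPush st kv else st)
      (if !(y.any (fun kv => pvIsSpecific kv.2)) then
        y.foldl (fun st kv => if pvIsNremSub kv.2 && !(st.1.contains kv.1) then pvPush st kv
          else st)
          (pvNremPatterns.foldl (fun st p => pvFindPattern p y st)
            (y.foldl (fun st kv => if (pvStrip kv.2 == "REM") && !(st.1.contains kv.1) then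
                pvPush st kv else st)
              (y.foldl (fun st kv => if pvIsWake kv.2 then pvPush st kv else st)
                (PySem.Dict.empty, PySem.Dict.empty, 0))))
      else
        pvNremPatterns.foldl (fun st p => pvFindPattern p y st)
          (y.foldl (fun st kv => if (pvStrip kv.2 == "REM") && !(st.1.contains kv.1) then
              pvPush st kv else st)
            (y.foldl (fun st kv => if pvIsWake kv.2 then pvPush st kv else st)
              (PySem.Dict.empty, PySem.Dict.empty, 0)))))
      = pvMkSt (pvOrdered y) := by
  have e0 : ((PySem.Dict.empty, PySem.Dict.empty, 0) :
      PySem.Dict Int Int × PySem.Dict Int String × Int) = pvMkSt [] := rfl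
  rw [e0, pvPassPlain, List.nil_append, pvPassMem _ y _ hnd]
  have hfil2 : y.filter (fun kv => (pvStrip kv.2 == "REM") &&
      !(decide (kv.1 ∈ (y.filter (fun kv => pvIsWake kv.2)).map Prod.fst)))
      = y.filter (fun kv => !pvIsWake kv.2 && (pvStrip kv.2 == "REM")) := by
    apply List.filter_congr
    intro kv hkv
    rw [pvDecide_eq (pvMem_filter_keys y hnd _ kv hkv)]
    cases pvIsWake kv.2 <;> cases (pvStrip kv.2 == "REM") <;> simp
  rw [hfil2]
  have hos2 : y.filter (fun kv => pvIsWake kv.2) ++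
      y.filter (fun kv => !pvIsWake kv.2 && (pvStrip kv.2 == "REM")) = pvOs2 y := rfl
  rw [hos2]
  have hst3 : pvNremPatterns.foldl (fun st p => pvFindPattern p y st) (pvMkSt (pvOs2 y))
      = pvMkSt (pvOs2 y ++ pvNremPatterns.flatMap (pvSlotItem y)) := by
    have := pvStep3 y hnd pvNremPatterns [] rfl
    simpa using this
  rw [hst3]
  -- step 4 and step 5
  by_cases hhs : y.any (fun kv => pvIsSpecific kv.2) = true
  · rw [hhs]
    simp only [Bool.not_true, Bool.false_eq_true, if_false]
    rw [pvPassAll y _ hnd]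
    have hfil5 : y.filter (fun kv =>
        !(decide (kv.1 ∈ (pvOs2 y ++ pvNremPatterns.flatMap (pvSlotItem y)).map Prod.fst)))
        = y.filter (pvRestPred y true) := by
      apply List.filter_congr
      intro kv hkv
      rw [pvDecide_eq (pvMem_os3_keys y hnd kv hkv)]
      unfold pvRestPred
      cases pvIsWake kv.2 <;> cases (pvStrip kv.2 == "REM") <;> cases pvPicked y kv <;> simp
    rw [hfil5]
    have hgen : y.filter (pvGenPred y true) = [] := by
      rw [List.filter_eq_nil_iff]
      intro kv _
      simp [pvGenPred]
    unfold pvOrdered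
    rw [hhs, hgen]
    simp [pvOs2, List.append_assoc]
  · have hhs' : y.any (fun kv => pvIsSpecific kv.2) = false := Bool.eq_false_iff.2 hhs
    rw [hhs']
    simp only [Bool.not_false, if_true]
    rw [pvPassMem _ y _ hnd]
    have hfil4 : y.filter (fun kv => pvIsNremSub kv.2 &&
        !(decide (kv.1 ∈ (pvOs2 y ++ pvNremPatterns.flatMap (pvSlotItem y)).map Prod.fst)))
        = y.filter (pvGenPred y false) := by
      apply List.filter_congr
      intro kv hkv
      rw [pvDecide_eq (pvMem_os3_keys y hnd kv hkv)]
      unfold pvGenPred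
      cases pvIsWake kv.2 <;> cases (pvStrip kv.2 == "REM") <;> cases pvPicked y kv <;>
        cases pvIsNremSub kv.2 <;> simp
    rw [hfil4, pvPassAll y _ hnd]
    have hfil5 : y.filter (fun kv => !(decide (kv.1 ∈
        ((pvOs2 y ++ pvNremPatterns.flatMap (pvSlotItem y)) ++
          y.filter (pvGenPred y false)).map Prod.fst)))
        = y.filter (pvRestPred y false) := by
      apply List.filter_congr
      intro kv hkv
      have hmem : kv.1 ∈ ((pvOs2 y ++ pvNremPatterns.flatMap (pvSlotItem y)) ++
          y.filter (pvGenPred y false)).map Prod.fst ↔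
          (pvIsWake kv.2 || (pvStrip kv.2 == "REM") || pvPicked y kv ||
            pvGenPred y false kv) = true := by
        rw [List.map_append, List.mem_append, pvMem_os3_keys y hnd kv hkv,
          pvMem_filter_keys y hnd _ kv hkv]
        cases pvIsWake kv.2 <;> cases (pvStrip kv.2 == "REM") <;> cases pvPicked y kv <;>
          cases h4 : pvGenPred y false kv <;> simp
      rw [pvDecide_eq hmem]
      unfold pvRestPred pvGenPred
      cases pvIsWake kv.2 <;> cases (pvStrip kv.2 == "REM") <;> cases pvPicked y kv <;>
        cases pvIsNremSub kv.2 <;> simp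
    rw [hfil5]
    unfold pvOrdered
    rw [hhs']
    simp [pvOs2, List.append_assoc]

-- the common output shape
def pvOut (os : List (Int × String)) (stages : List Int) : (List (Int × String)) × List Int :=
  ((pvLabDict os).items, stages.map (fun s => ((pvKeyDict os).get? s).getD 0))

theorem pvA_out (y : List (Int × String)) (stages : List Int)
    (hnd : (y.map Prod.fst).Nodup) :
    reorder_labels_stages y stages = pvOut (pvOrdered y) stages := by
  show (let st0 : PySem.Dict Int Int × PySem.Dict Int String × Int :=
      (PySem.Dict.empty, PySem.Dict.empty, 0); _) = _
  simp only [reorder_labels_stages]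
  rw [pvA_state y hnd]
  rfl

-- == B's single pass ==

def pvBSt (y : List (Int × String)) (hs : Bool) (t : List (Int × String)) :
    List (Int × String) × List (Int × String) × List (Option (Int × String)) ×
      List (Int × String) × List (Int × String) :=
  (t.filter (fun kv => pvIsWake kv.2),
   t.filter (fun kv => !pvIsWake kv.2 && (pvStrip kv.2 == "REM")),
   (List.range pvNremPatterns.length).map
     (fun i => t.find? (pvSlotPred (pvNremPatterns.getD i ""))),
   t.filter (pvGenPred y hs),
   t.filter (pvRestPred y hs))

theorem pvFilter_append_one (t : List (Int × String)) (kv : Int × String)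
    (q : Int × String → Bool) (h : q kv = false) :
    (t ++ [kv]).filter q = t.filter q := by
  simp [List.filter_append, h]

theorem pvFilter_append_one' (t : List (Int × String)) (kv : Int × String)
    (q : Int × String → Bool) (h : q kv = true) :
    (t ++ [kv]).filter q = t.filter q ++ [kv] := by
  simp [List.filter_append, h]

theorem pvFind?_append_one (t : List (Int × String)) (kv : Int × String)
    (q : Int × String → Bool) (h : q kv = false) :
    (t ++ [kv]).find? q = t.find? q := by
  rw [List.find?_append]
  simp [h]

theorem pvSlotPred_false_of_wake (kv : Int × String) (p : String) (h : pvIsWake kv.2 = true) :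
    pvSlotPred p kv = false := by
  simp [pvSlotPred, h]

theorem pvSlotPred_false_of_rem (kv : Int × String) (p : String)
    (h : (pvStrip kv.2 == "REM") = true) :
    pvSlotPred p kv = false := by
  simp [pvSlotPred, h]

-- picked is false for an item whose stripped label matches no pattern, or whose pattern
-- was already taken by an earlier item
theorem pvPicked_false_of_no_pattern (y : List (Int × String)) (kv : Int × String)
    (h : pvStrip kv.2 ∉ pvNremPatterns) : pvPicked y kv = false := by
  rw [Bool.eq_false_iff]
  intro hp
  obtain ⟨p, hp_mem, hf⟩ := (pvPicked_iff y kv).1 hp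
  have := List.find?_some hf
  simp only [pvSlotPred, Bool.and_eq_true, beq_iff_eq] at this
  exact h (this.2 ▸ hp_mem)

theorem pvSlots_unchanged (t : List (Int × String)) (kv : Int × String)
    (h : ∀ p ∈ pvNremPatterns, pvSlotPred p kv = false) :
    (List.range pvNremPatterns.length).map
        (fun i => (t ++ [kv]).find? (pvSlotPred (pvNremPatterns.getD i "")))
      = (List.range pvNremPatterns.length).map
        (fun i => t.find? (pvSlotPred (pvNremPatterns.getD i ""))) := by
  apply List.map_congr_left
  intro i hi
  rw [List.mem_range] at hi
  have hm : pvNremPatterns.getD i "" ∈ pvNremPatterns := by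
    rw [List.getD_eq_getElem _ _ hi]
    exact List.getElem_mem _
  exact pvFind?_append_one t kv _ (h _ hm)

theorem pvBStep_wake (y : List (Int × String)) (hs : Bool) (t : List (Int × String))
    (kv : Int × String) (hw : pvIsWake kv.2 = true) :
    pvBStep hs (pvBSt y hs t) kv = pvBSt y hs (t ++ [kv]) := by
  simp only [pvBStep, pvBSt]
  rw [hw]
  simp only [if_true]
  rw [pvFilter_append_one' t kv _ hw,
    pvFilter_append_one t kv _ (by simp [hw]),
    pvFilter_append_one t kv _ (by simp [pvGenPred, hw]),
    pvFilter_append_one t kv _ (by simp [pvRestPred, hw]),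
    pvSlots_unchanged t kv (fun p _ => pvSlotPred_false_of_wake kv p hw)]

theorem pvBStep_rem (y : List (Int × String)) (hs : Bool) (t : List (Int × String))
    (kv : Int × String) (hw : pvIsWake kv.2 = false)
    (hr : (pvStrip kv.2 == "REM") = true) :
    pvBStep hs (pvBSt y hs t) kv = pvBSt y hs (t ++ [kv]) := by
  simp only [pvBStep, pvBSt]
  rw [hw, hr]
  simp only [Bool.false_eq_true, if_false, if_true]
  rw [pvFilter_append_one t kv _ hw,
    pvFilter_append_one' t kv _ (by simp [hw, hr]),
    pvFilter_append_one t kv _ (by simp [pvGenPred, hr]),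
    pvFilter_append_one t kv _ (by simp [pvRestPred, hr]),
    pvSlots_unchanged t kv (fun p _ => pvSlotPred_false_of_rem kv p hr)]

theorem pvSlotPred_getD_false (kv : Int × String) (j : Nat) (hjn : j < pvNremPatterns.length)
    (hne : pvStrip kv.2 ≠ pvNremPatterns[j]) :
    pvSlotPred (pvNremPatterns.getD j "") kv = false := by
  rw [List.getD_eq_getElem _ _ hjn]
  simp [pvSlotPred, hne]

theorem pvBStep_slot (y t r : List (Int × String)) (kv : Int × String)
    (hy : y = t ++ kv :: r) (hs : Bool)
    (hw : pvIsWake kv.2 = false) (hr : (pvStrip kv.2 == "REM") = false)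
    (i : Nat) (hidx : PySem.List.index? pvNremPatterns (pvStrip kv.2) = some i)
    (hslot : t.find? (pvSlotPred (pvStrip kv.2)) = none) :
    pvBStep hs (pvBSt y hs t) kv = pvBSt y hs (t ++ [kv]) := by
  obtain ⟨hk, hgetelem, -⟩ := PySem.List.getElem_of_index?_eq_some hidx
  have hgetd : pvNremPatterns.getD i "" = pvStrip kv.2 := by
    rw [List.getD_eq_getElem _ _ hk]; exact hgetelem
  have hpredkv : pvSlotPred (pvStrip kv.2) kv = true := by
    simp [pvSlotPred, hw, hr]
  have hpicked : pvPicked y kv = true := by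
    apply (pvPicked_iff y kv).2
    refine ⟨pvStrip kv.2, ?_, ?_⟩
    · rw [← hgetelem]; exact List.getElem_mem _
    · rw [hy, List.find?_append, hslot]
      simp [hpredkv]
  have hsl : ((List.range pvNremPatterns.length).map
      (fun j => t.find? (pvSlotPred (pvNremPatterns.getD j ""))))[i]?.getD none = none := by
    rw [List.getElem?_map,
      show (List.range pvNremPatterns.length)[i]? = some i from by simp [hk],
      Option.map_some, Option.getD_some, hgetd, hslot]
  have hslots : ((List.range pvNremPatterns.length).map
        (fun j => t.find? (pvSlotPred (pvNremPatterns.getD j "")))).set i (some kv)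
      = (List.range pvNremPatterns.length).map
        (fun j => (t ++ [kv]).find? (pvSlotPred (pvNremPatterns.getD j ""))) := by
    apply List.ext_getElem (by simp)
    intro j hj hj'
    have hjn : j < pvNremPatterns.length := by simpa using hj'
    rw [List.getElem_set, List.getElem_map, List.getElem_map]
    rw [show (List.range pvNremPatterns.length)[j]'(by simpa using hjn) = j from by simp]
    by_cases hji : i = j
    · subst hji
      rw [if_pos rfl, hgetd, List.find?_append, hslot]
      simp [hpredkv]
    · rw [if_neg hji]
      have hne : pvStrip kv.2 ≠ pvNremPatterns[j] := by
        rw [← hgetelem]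
        intro h
        exact hji (pvNrem_nodup.getElem_inj_iff.mp h)
      rw [pvFind?_append_one t kv _ (pvSlotPred_getD_false kv j hjn hne)]
  simp only [pvBStep, pvBSt]
  rw [hw, hr, hidx]
  simp only [Bool.false_eq_true, if_false]
  rw [hsl, if_pos rfl]
  rw [hslots,
    pvFilter_append_one t kv _ hw,
    pvFilter_append_one t kv (fun kv => !pvIsWake kv.2 && (pvStrip kv.2 == "REM")) (by simp [hr]),
    pvFilter_append_one t kv _ (by simp [pvGenPred, hpicked]),
    pvFilter_append_one t kv _ (by simp [pvRestPred, hpicked])]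

theorem pvBStep_taken (y t r : List (Int × String)) (kv : Int × String)
    (hy : y = t ++ kv :: r) (hnd : (y.map Prod.fst).Nodup) (hs : Bool)
    (hw : pvIsWake kv.2 = false) (hr : (pvStrip kv.2 == "REM") = false)
    (i : Nat) (hidx : PySem.List.index? pvNremPatterns (pvStrip kv.2) = some i)
    (x : Int × String) (hslot : t.find? (pvSlotPred (pvStrip kv.2)) = some x) :
    pvBStep hs (pvBSt y hs t) kv = pvBSt y hs (t ++ [kv]) := by
  obtain ⟨hk, hgetelem, -⟩ := PySem.List.getElem_of_index?_eq_some hidx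
  have hgetd : pvNremPatterns.getD i "" = pvStrip kv.2 := by
    rw [List.getD_eq_getElem _ _ hk]; exact hgetelem
  have hfst : kv.1 ∉ t.map Prod.fst := by
    rw [hy, List.map_append, List.map_cons] at hnd
    have h2 := (List.nodup_append.1 hnd).2.2
    intro hmem
    exact h2 kv.1 hmem kv.1 (by simp) rfl
  have hkv_not_t : kv ∉ t := fun hm => hfst (List.mem_map_of_mem hm)
  have hpicked : pvPicked y kv = false := by
    rw [Bool.eq_false_iff]
    intro hp
    obtain ⟨p, hp_mem, hf⟩ := (pvPicked_iff y kv).1 hp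
    have hsp := List.find?_some hf
    simp only [pvSlotPred, Bool.and_eq_true, beq_iff_eq] at hsp
    have hpe : p = pvStrip kv.2 := hsp.2.symm
    subst hpe
    rw [hy, List.find?_append, hslot] at hf
    simp at hf
    exact hkv_not_t (hf ▸ List.mem_of_find?_eq_some hslot)
  have hslots : (List.range pvNremPatterns.length).map
        (fun j => (t ++ [kv]).find? (pvSlotPred (pvNremPatterns.getD j "")))
      = (List.range pvNremPatterns.length).map
        (fun j => t.find? (pvSlotPred (pvNremPatterns.getD j ""))) := by
    apply List.map_congr_left
    intro j hj
    rw [List.mem_range] at hj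
    by_cases hji : j = i
    · subst hji
      rw [hgetd, List.find?_append, hslot]
      simp
    · have hne : pvStrip kv.2 ≠ pvNremPatterns[j] := by
        rw [← hgetelem]
        intro h
        exact hji (pvNrem_nodup.getElem_inj_iff.mp h).symm
      exact pvFind?_append_one t kv _ (pvSlotPred_getD_false kv j hj hne)
  have hslc : ((List.range pvNremPatterns.length).map
      (fun j => t.find? (pvSlotPred (pvNremPatterns.getD j ""))))[i]?.getD none
      = some x := by
    rw [List.getElem?_map,
      show (List.range pvNremPatterns.length)[i]? = some i from by simp [hk],
      Option.map_some, Option.getD_some, hgetd, hslot]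
  simp only [pvBStep, pvBSt]
  rw [hw, hr, hidx]
  simp only [Bool.false_eq_true, if_false]
  rw [hslc]
  simp only [reduceCtorEq, if_false]
  rw [hslots,
    pvFilter_append_one t kv _ hw,
    pvFilter_append_one t kv (fun kv => !pvIsWake kv.2 && (pvStrip kv.2 == "REM")) (by simp [hr])]
  by_cases hgN : (!hs && pvIsNremSub kv.2) = true
  · rw [if_pos hgN]
    rw [pvFilter_append_one' t kv _ (by simp [pvGenPred, hw, hr, hpicked, hgN]),
      pvFilter_append_one t kv _ (by simp [pvRestPred, hgN])]
  · have hgN' : (!hs && pvIsNremSub kv.2) = false := Bool.eq_false_iff.2 hgN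
    rw [if_neg hgN]
    rw [pvFilter_append_one t kv _ (by simp [pvGenPred, hgN']),
      pvFilter_append_one' t kv _ (by simp [pvRestPred, hw, hr, hpicked, hgN'])]

theorem pvBStep_nopattern (y t : List (Int × String)) (kv : Int × String) (hs : Bool)
    (hw : pvIsWake kv.2 = false) (hr : (pvStrip kv.2 == "REM") = false)
    (hidx : PySem.List.index? pvNremPatterns (pvStrip kv.2) = none) :
    pvBStep hs (pvBSt y hs t) kv = pvBSt y hs (t ++ [kv]) := by
  have hnm : pvStrip kv.2 ∉ pvNremPatterns := (PySem.List.index?_eq_none_iff _ _).1 hidx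
  have hpicked : pvPicked y kv = false := pvPicked_false_of_no_pattern y kv hnm
  have hpf : ∀ p ∈ pvNremPatterns, pvSlotPred p kv = false := by
    intro p hp
    simp only [pvSlotPred, hw, hr]
    have : pvStrip kv.2 ≠ p := fun h => hnm (h ▸ hp)
    simp [this]
  simp only [pvBStep, pvBSt]
  rw [hw, hr, hidx]
  simp only [Bool.false_eq_true, if_false]
  rw [pvSlots_unchanged t kv hpf,
    pvFilter_append_one t kv _ hw,
    pvFilter_append_one t kv (fun kv => !pvIsWake kv.2 && (pvStrip kv.2 == "REM")) (by simp [hr])]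
  by_cases hgN : (!hs && pvIsNremSub kv.2) = true
  · rw [if_pos hgN]
    rw [pvFilter_append_one' t kv _ (by simp [pvGenPred, hw, hr, hpicked, hgN]),
      pvFilter_append_one t kv _ (by simp [pvRestPred, hgN])]
  · have hgN' : (!hs && pvIsNremSub kv.2) = false := Bool.eq_false_iff.2 hgN
    rw [if_neg hgN]
    rw [pvFilter_append_one t kv _ (by simp [pvGenPred, hgN']),
      pvFilter_append_one' t kv _ (by simp [pvRestPred, hw, hr, hpicked, hgN'])]

theorem pvBFold (y : List (Int × String)) (hnd : (y.map Prod.fst).Nodup) (hs : Bool) :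
    ∀ (r t : List (Int × String)), t ++ r = y →
    r.foldl (pvBStep hs) (pvBSt y hs t) = pvBSt y hs y := by
  intro r
  induction r with
  | nil => intro t ht; rw [List.foldl_nil, ← ht, List.append_nil]
  | cons kv r' ih =>
    intro t ht
    rw [List.foldl_cons]
    have hstep : pvBStep hs (pvBSt y hs t) kv = pvBSt y hs (t ++ [kv]) := by
      by_cases hw : pvIsWake kv.2 = true
      · exact pvBStep_wake y hs t kv hw
      · have hw' : pvIsWake kv.2 = false := Bool.eq_false_iff.2 hw
        by_cases hrem : (pvStrip kv.2 == "REM") = true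
        · exact pvBStep_rem y hs t kv hw' hrem
        · have hrem' : (pvStrip kv.2 == "REM") = false := Bool.eq_false_iff.2 hrem
          cases hidx : PySem.List.index? pvNremPatterns (pvStrip kv.2) with
          | some i =>
            cases hslot : t.find? (pvSlotPred (pvStrip kv.2)) with
            | none => exact pvBStep_slot y t r' kv ht.symm hs hw' hrem' i hidx hslot
            | some x => exact pvBStep_taken y t r' kv ht.symm hnd hs hw' hrem' i hidx x hslot
          | none => exact pvBStep_nopattern y t kv hs hw' hrem' hidx
    rw [hstep]
    exact ih (t ++ [kv]) (by rw [← ht, List.append_assoc]; rfl)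

theorem pvBSt_nil (y : List (Int × String)) (hs : Bool) :
    pvBSt y hs [] = ([], [], List.replicate pvNremPatterns.length none, [], []) := by
  unfold pvBSt
  simp

theorem pvSlots_flatMap (y : List (Int × String)) :
    ((List.range pvNremPatterns.length).map
      (fun i => y.find? (pvSlotPred (pvNremPatterns.getD i "")))).filterMap id
      = pvNremPatterns.flatMap (pvSlotItem y) := by
  rw [List.filterMap_map]
  have hcomp : (id ∘ fun i => y.find? (pvSlotPred (pvNremPatterns.getD i "")))
      = fun i => y.find? (pvSlotPred (pvNremPatterns.getD i "")) := rfl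
  rw [hcomp, List.filterMap_eq_flatMap_toList]
  have hpat : pvNremPatterns = (List.range pvNremPatterns.length).map
      (fun i => pvNremPatterns.getD i "") := by decide
  conv_rhs => rw [hpat]
  rw [List.flatMap_map]
  rfl

theorem pvB_out (y : List (Int × String)) (stages : List Int)
    (hnd : (y.map Prod.fst).Nodup) :
    reorder_labels_stages_alt y stages = pvOut (pvOrdered y) stages := by
  show (let has_specific_nrem := y.any (fun kv => pvIsSpecific kv.2); _) = _
  simp only [reorder_labels_stages_alt]
  rw [show (([], [], List.replicate pvNremPatterns.length none, [], []) :
      List (Int × String) × List (Int × String) × List (Option (Int × String)) ×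
        List (Int × String) × List (Int × String))
    = pvBSt y (y.any (fun kv => pvIsSpecific kv.2)) [] from (pvBSt_nil y _).symm]
  rw [pvBFold y hnd _ y [] rfl]
  unfold pvBSt
  rw [pvSlots_flatMap y]
  unfold pvOut pvOrdered
  rw [pvLabDict_items]
  rfl

-- ===== VERDICT (by name: the statement is the Claim_ definition above) =====
theorem reorder_labels_stages_spec : Claim_equal_reorder_labels_stages := by
  intro y_labels stages _ hpre
  unfold Spec_reorder_labels_stages
  rw [pvA_out y_labels stages hpre.1, pvB_out y_labels stages hpre.1]
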